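-- pv_equiv track=rewrite | github.com/cubyto/Fundamentals-computing | works/trabajo2-funciones.py | render_list_iterating
-- ===== SOURCE A (Python) =====
-- def render_list_iterating(string) -> list:
--     # Lista de operadores y símbolos
--     new_str = ""
--     for char in string:
--         if char != "0":
--             new_str += "#"
--         else:
--             new_str += char
--     return new_str.split("#")
-- ===== SOURCE B (Python) =====
-- def render_list_iterating(string) -> list:
--     # Build the runs of zeros directly: keep the finished runs and the
--     # current run; every non-'0' character closes the current run.
--     runs = []
--     cur = ""
--     for char in string:
--         if char == "0":
--             cur += char
--         else:
--             runs.append(cur)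
--             cur = ""
--     runs.append(cur)
--     return runs
-- ===== Notes on version B (the rewrite author's own statement) =====
-- stated objective: simpler
-- what changed: B builds the list of zero-runs directly in one pass with a (finished runs, current run) accumulator, instead of first constructing an intermediate marker string and then calling str.split on the marker.
import Mathlib
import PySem

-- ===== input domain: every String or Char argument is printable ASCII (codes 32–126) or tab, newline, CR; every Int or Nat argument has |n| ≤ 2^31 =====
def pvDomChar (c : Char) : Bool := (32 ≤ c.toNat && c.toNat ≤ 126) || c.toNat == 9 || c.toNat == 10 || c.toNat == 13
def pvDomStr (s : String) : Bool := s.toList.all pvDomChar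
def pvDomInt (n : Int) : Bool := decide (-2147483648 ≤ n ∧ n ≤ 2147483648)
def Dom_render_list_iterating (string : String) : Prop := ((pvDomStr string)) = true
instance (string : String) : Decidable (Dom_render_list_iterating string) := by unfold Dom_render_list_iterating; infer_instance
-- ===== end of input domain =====

-- B builds the list of zero-runs directly in one pass with a (finished runs, current run)
-- accumulator, instead of building an intermediate marker string and splitting it (objective: simpler).

-- ===== PORT A =====
def render_list_iterating (string : String) : List String :=
  let new_str : List Char := string.toList.foldl
    (fun acc char => if char ≠ '0' then acc ++ ['#'] else acc ++ [char]) []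
  (PySem.Chars.splitOn new_str ['#']).map String.ofList

-- ===== PORT B =====
def render_list_iterating_alt (string : String) : List String :=
  let st := string.toList.foldl
    (fun (p : List (List Char) × List Char) char =>
      if char = '0' then (p.1, p.2 ++ [char]) else (p.1 ++ [p.2], []))
    ([], [])
  (st.1 ++ [st.2]).map String.ofList

-- ===== PRECONDITION & SPEC =====
def Spec_render_list_iterating (string : String) (out : List String) : Prop := out = render_list_iterating_alt string
instance (string : String) (out : List String) : Decidable (Spec_render_list_iterating string out) := by unfold Spec_render_list_iterating; infer_instance

-- ===== CLAIM (what is proved, stated in full; the proofs are below) =====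
def Claim_equal_render_list_iterating : Prop := ∀ (string : String), Dom_render_list_iterating string → Spec_render_list_iterating string (render_list_iterating string)

-- ===== LEMMAS AND PROOFS =====

/-- Proof-side recursion computing the list of zero-runs. -/
def pvRuns : List Char → List (List Char)
  | [] => [[]]
  | c :: rest =>
    if c = '0' then
      match pvRuns rest with
      | [] => []
      | h :: t => (c :: h) :: t
    else [] :: pvRuns rest

/-- Attach a prefix to the first run. -/
def pvAttach (cur : List Char) : List (List Char) → List (List Char)
  | [] => [cur]
  | h :: t => (cur ++ h) :: t

theorem pvRuns_ne_nil (l : List Char) : pvRuns l ≠ [] := by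
  induction l with
  | nil => simp [pvRuns]
  | cons c rest ih =>
    simp only [pvRuns]
    split
    · cases h : pvRuns rest with
      | nil => exact absurd h ih
      | cons a b => simp
    · simp

theorem pvAttach_nil (xs : List (List Char)) (h : xs ≠ []) : pvAttach [] xs = xs := by
  cases xs with
  | nil => exact absurd rfl h
  | cons a b => simp [pvAttach]

/-- The marker map A applies char-by-char. -/
def pvMark (c : Char) : Char := if c ≠ '0' then '#' else c

theorem foldA_eq_map (l acc : List Char) :
    l.foldl (fun acc char => if char ≠ '0' then acc ++ ['#'] else acc ++ [char]) acc
      = acc ++ l.map pvMark := by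
  induction l generalizing acc with
  | nil => simp
  | cons c rest ih =>
    rw [List.foldl_cons, ih]
    by_cases hc : c = '0' <;> simp [pvMark, hc]

theorem foldB_eq_runs (l : List Char) (runs : List (List Char)) (cur : List Char) :
    (l.foldl (fun (p : List (List Char) × List Char) char =>
        if char = '0' then (p.1, p.2 ++ [char]) else (p.1 ++ [p.2], [])) (runs, cur)).1
      ++ [(l.foldl (fun (p : List (List Char) × List Char) char =>
        if char = '0' then (p.1, p.2 ++ [char]) else (p.1 ++ [p.2], [])) (runs, cur)).2]
      = runs ++ pvAttach cur (pvRuns l) := by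
  induction l generalizing runs cur with
  | nil => simp [pvRuns, pvAttach]
  | cons c rest ih =>
    rw [List.foldl_cons]
    by_cases hc : c = '0'
    · subst hc
      rw [if_pos rfl, ih]
      simp only [pvRuns]
      cases hr : pvRuns rest with
      | nil => exact absurd hr (pvRuns_ne_nil rest)
      | cons a b => simp [pvAttach]
    · rw [if_neg hc, ih]
      rw [pvAttach_nil _ (pvRuns_ne_nil rest)]
      simp [pvRuns, if_neg hc, pvAttach]

theorem go_spec (l : List Char) (fuel : Nat) (cur : List Char) (acc : List (List Char))
    (h : l.length < fuel) :
    PySem.Chars.splitOn.go ['#'] fuel (l.map pvMark) cur acc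
      = acc.reverse ++ pvAttach cur.reverse (pvRuns l) := by
  induction l generalizing fuel cur acc with
  | nil =>
    cases fuel with
    | zero => omega
    | succ f =>
      rw [List.map_nil, PySem.Chars.splitOn.go] <;> simp [pvRuns, pvAttach]
  | cons c rest ih =>
    cases fuel with
    | zero => omega
    | succ f =>
      have hf : rest.length < f := by simpa using Nat.lt_of_succ_lt_succ h
      rw [List.map_cons, PySem.Chars.splitOn.go]
      by_cases hc : c = '0'
      · subst hc
        have hm : pvMark '0' = '0' := rfl
        rw [hm, if_neg (by simp [List.isPrefixOf]), ih f ('0' :: cur) acc hf]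
        simp only [pvRuns]
        cases hr : pvRuns rest with
        | nil => exact absurd hr (pvRuns_ne_nil rest)
        | cons a b => simp [pvAttach]
      · have hm : pvMark c = '#' := by simp [pvMark, hc]
        rw [hm, if_pos (by simp [List.isPrefixOf])]
        have hdrop : List.drop (List.length ['#']) (('#' : Char) :: rest.map pvMark)
            = rest.map pvMark := by simp
        rw [hdrop, ih f [] (cur.reverse :: acc) hf, List.reverse_nil,
          pvAttach_nil _ (pvRuns_ne_nil rest)]
        simp [pvRuns, if_neg hc, pvAttach]

theorem ports_eq (string : String) :
    render_list_iterating string = render_list_iterating_alt string := by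
  simp only [render_list_iterating, render_list_iterating_alt]
  rw [foldA_eq_map, List.nil_append, foldB_eq_runs, List.nil_append]
  unfold PySem.Chars.splitOn
  rw [go_spec string.toList _ [] [] (by simp)]
  simp [pvAttach_nil _ (pvRuns_ne_nil string.toList)]

-- ===== VERDICT (by name: the statement is the Claim_ definition above) =====
theorem render_list_iterating_spec : Claim_equal_render_list_iterating := by
  intro string _
  unfold Spec_render_list_iterating
  exact ports_eq string
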